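-- pv_equiv track=rewrite | github.com/etsvetanov/Algorithms | codility/Flags.py | solution
-- ===== SOURCE A (Python) =====
-- def solution(A):
--     N = len(A)
--     if N < 3:
--         return 0
--
--     peaks = [i for i in range(1, N - 1) if A[i] > A[i - 1] and A[i] > A[i + 1]]
--
--     if len(peaks) <= 2:
--         return len(peaks)
--
--     first_to_last_dist = peaks[-1] - peaks[0]
--
--     for num_flags in range(len(peaks), 1, -1):
--         if (num_flags - 1) * num_flags > first_to_last_dist:
--             continue
--
--         last_flag = peaks[0]
--         planted_flags = 1
--
--         for peak in peaks[1:]: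
--             if peak - last_flag >= num_flags:
--                 planted_flags += 1
--                 last_flag = peak
--
--             if planted_flags == num_flags:
--                 return planted_flags
-- ===== SOURCE B (Python) =====
-- def solution(A):
--     N = len(A)
--     if N < 3:
--         return 0
--
--     peaks = [i for i in range(1, N - 1) if A[i] > A[i - 1] and A[i] > A[i + 1]]
--     P = len(peaks)
--     if P <= 2:
--         return P
--
--     dist = peaks[-1] - peaks[0]
--
--     # next_peak[j] = smallest peak index >= j, or -1 if none (backward pass)
--     ps = set(peaks)
--     rev = [-1]
--     for j in range(N - 1, -1, -1):
--         rev.append(j if j in ps else rev[-1])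
--     next_peak = rev[::-1]
--
--     # largest candidate k with (k - 1) * k <= dist and k <= P
--     k = 2
--     while (k + 1) * k <= dist and k < P:
--         k += 1
--
--     # greedy by O(1) jumps through next_peak instead of scanning all peaks
--     while k >= 2:
--         pos = peaks[0]
--         cnt = 1
--         while cnt < k:
--             nxt = pos + k
--             if nxt >= N or next_peak[nxt] == -1:
--                 break
--             pos = next_peak[nxt]
--             cnt += 1
--         if cnt == k:
--             return k
--         k -= 1
--     return 0  # unreachable: k == 2 always succeeds when P >= 3
-- ===== Notes on version B (the rewrite author's own statement) =====
-- stated objective: alternative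
-- what changed: Per candidate flag count, B replaces A's linear rescan of the whole peak list by O(1) jumps through a precomputed next-peak array, and it computes the first admissible candidate directly instead of skipping candidates one by one.
import Mathlib
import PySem

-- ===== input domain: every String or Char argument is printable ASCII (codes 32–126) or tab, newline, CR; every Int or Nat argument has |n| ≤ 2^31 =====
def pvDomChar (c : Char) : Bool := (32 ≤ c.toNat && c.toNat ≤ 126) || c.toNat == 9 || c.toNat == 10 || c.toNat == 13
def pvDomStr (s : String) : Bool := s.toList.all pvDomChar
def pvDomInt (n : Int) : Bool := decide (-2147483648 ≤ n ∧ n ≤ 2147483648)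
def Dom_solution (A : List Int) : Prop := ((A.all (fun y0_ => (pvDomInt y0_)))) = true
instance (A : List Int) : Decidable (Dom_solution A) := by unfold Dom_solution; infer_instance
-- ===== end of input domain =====

-- B replaces A's per-candidate scan over all peaks by a precomputed next-peak array with greedy jumps (alternative algorithm; same return value).

-- ===== PORT A =====
-- inner 'for peak in peaks[1:]' loop: returns some v where the Python returns, none if the loop finishes
def innerA (k : Int) : List Int → Int → Int → Option Int
  | [], _, _ => none
  | p :: rest, last, cnt =>
    if p - last ≥ k then
      (if cnt + 1 = k then some (cnt + 1) else innerA k rest p (cnt + 1))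
    else
      (if cnt = k then some cnt else innerA k rest last cnt)

-- outer 'for num_flags in range(len(peaks), 1, -1)' loop over the list of candidate counts
def outerA (peaks : List Int) (dist : Int) : List Int → Option Int
  | [] => none
  | k :: ks =>
    if (k - 1) * k > dist then outerA peaks dist ks
    else
      match innerA k (PySem.List.slice peaks (some 1) none) (PySem.List.pyGetD peaks 0 0) 1 with
      | some v => some v
      | none => outerA peaks dist ks

def solution (A : List Int) : Int :=
  let N : Int := A.length
  if N < 3 then 0
  else
    let peaks := (PySem.List.pyRange 1 (N - 1) 1).filter
      (fun i => decide (PySem.List.pyGetD A i 0 > PySem.List.pyGetD A (i - 1) 0) &&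
                decide (PySem.List.pyGetD A i 0 > PySem.List.pyGetD A (i + 1) 0))
    if (peaks.length : Int) ≤ 2 then (peaks.length : Int)
    else
      let dist := PySem.List.pyGetD peaks (-1) 0 - PySem.List.pyGetD peaks 0 0
      -- Python falls off the function (None) if no candidate returns; that is unreachable
      -- (num_flags = 2 always returns), so the 'none' arm's value is never produced
      match outerA peaks dist (PySem.List.pyRange (peaks.length : Int) 1 (-1)) with
      | some v => v
      | none => 0

-- ===== PORT B =====
-- 'while (k + 1) * k <= dist and k < P: k += 1'; fuel (P - 2).toNat bounds the ≤ P - 2 iterations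
def kmaxLoop (dist P : Int) : Nat → Int → Int
  | 0, k => k
  | fuel + 1, k => if (k + 1) * k ≤ dist ∧ k < P then kmaxLoop dist P fuel (k + 1) else k

-- 'while cnt < k: …' jump loop; fuel = (k - cnt).toNat mirrors the loop condition; returns the final cnt
def jumpLoop (np : List Int) (N k : Int) : Nat → Int → Int → Int
  | 0, _, cnt => cnt
  | fuel + 1, pos, cnt =>
    let nxt := pos + k
    if nxt ≥ N ∨ PySem.List.pyGetD np nxt 0 = -1 then cnt
    else jumpLoop np N k fuel (PySem.List.pyGetD np nxt 0) (cnt + 1)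

-- 'while k >= 2' candidate loop over the descending list of candidates
def outerB (np : List Int) (N first : Int) : List Int → Option Int
  | [] => none
  | k :: ks =>
    let cnt := jumpLoop np N k (k - 1).toNat first 1
    if cnt = k then some k else outerB np N first ks

def solution_alt (A : List Int) : Int :=
  let N : Int := A.length
  if N < 3 then 0
  else
    let peaks := (PySem.List.pyRange 1 (N - 1) 1).filter
      (fun i => decide (PySem.List.pyGetD A i 0 > PySem.List.pyGetD A (i - 1) 0) &&
                decide (PySem.List.pyGetD A i 0 > PySem.List.pyGetD A (i + 1) 0))
    let P : Int := peaks.length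
    if P ≤ 2 then P
    else
      let dist := PySem.List.pyGetD peaks (-1) 0 - PySem.List.pyGetD peaks 0 0
      let ps : PySem.Set Int := PySem.Set.ofList peaks
      -- 'rev' is modelled reversed (cons = append, head = rev[-1]); next_peak = rev[::-1] is then the
      -- accumulator itself, and rev starts as [-1]
      let np := (PySem.List.pyRange (N - 1) (-1) (-1)).foldl
        (fun acc j => (if PySem.Set.contains ps j then j else acc.headI) :: acc) [-1]
      let kmax := kmaxLoop dist P (P - 2).toNat 2
      match outerB np N (PySem.List.pyGetD peaks 0 0) (PySem.List.pyRange kmax 1 (-1)) with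
      | some v => v
      | none => 0

-- ===== PRECONDITION & SPEC =====
def Spec_solution (A : List Int) (out : Int) : Prop := out = solution_alt A
instance (A : List Int) (out : Int) : Decidable (Spec_solution A out) := by unfold Spec_solution; infer_instance

-- ===== CLAIM (what is proved, stated in full; the proofs are below) =====
def Claim_equal_solution : Prop := ∀ (A : List Int), Dom_solution A → Spec_solution A (solution A)

-- ===== LEMMAS AND PROOFS =====

-- first element of peaks that is ≥ j, or -1 (the value next_peak[j] holds)
def firstGE (peaks : List Int) (j : Int) : Int :=
  (peaks.dropWhile (fun p => decide (p < j))).headD (-1)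

theorem dropWhile_append_of_forall (rest pre : List Int) (j : Int)
    (h : ∀ x ∈ pre, x < j) :
    (pre ++ rest).dropWhile (fun p => decide (p < j)) =
      rest.dropWhile (fun p => decide (p < j)) := by
  induction pre with
  | nil => rfl
  | cons x t ih =>
    have hx := h x (by simp)
    simp only [List.cons_append, List.dropWhile_cons, decide_eq_true_eq, if_pos hx]
    exact ih (fun y hy => h y (by simp [hy]))

theorem firstGE_step (peaks : List Int) (j : Int) (hs : peaks.Pairwise (· < ·)) :
    firstGE peaks j = if j ∈ peaks then j else firstGE peaks (j + 1) := by
  induction peaks with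
  | nil => simp [firstGE]
  | cons p t ih =>
    rcases List.pairwise_cons.mp hs with ⟨hp, ht⟩
    rcases lt_trichotomy p j with hlt | heq | hgt
    · have hne : j ≠ p := by omega
      have h1 : p < j + 1 := by omega
      simp only [firstGE, List.dropWhile_cons, decide_eq_true_eq, if_pos hlt, if_pos h1]
      simpa [firstGE, List.mem_cons, hne.symm, (by omega : ¬ j = p)] using ih ht
    · subst heq
      simp [firstGE]
    · have hnj : j ∉ p :: t := by
        intro hm
        rcases List.mem_cons.mp hm with h1 | h1
        · omega
        · exact absurd (hp j h1) (by omega)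
      rw [if_neg hnj]
      simp only [firstGE, List.dropWhile_cons]
      rw [if_neg (by simpa using (by omega : ¬ p < j)), if_neg (by simpa using (by omega : ¬ p < j + 1))]

theorem firstGE_top (peaks : List Int) (j : Int) (h : ∀ x ∈ peaks, x < j) :
    firstGE peaks j = -1 := by
  have : peaks.dropWhile (fun p => decide (p < j)) = [] := by
    rw [List.dropWhile_eq_nil_iff]
    intro x hx; simpa using h x hx
  simp [firstGE, this]

-- the backward build of next_peak yields the table of firstGE values for indices 0..N
theorem build_np (peaks : List Int) (N : Int) (hs : peaks.Pairwise (· < ·)) :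
    ∀ (n : Nat), (n : Int) ≤ N →
      (PySem.List.pyRange ((n : Int) - 1) (-1) (-1)).foldl
        (fun acc j => (if PySem.Set.contains (PySem.Set.ofList peaks) j then j else acc.headI) :: acc)
        ((PySem.List.pyRange (n : Int) (N + 1) 1).map (firstGE peaks)) =
      (PySem.List.pyRange 0 (N + 1) 1).map (firstGE peaks) := by
  intro n
  induction n with
  | zero =>
    intro _
    rw [show ((0 : Nat) : Int) - 1 = -1 by omega, PySem.List.pyRange_neg_one_eq_nil (by omega)]
    rfl
  | succ n ih =>
    intro hn
    have hn' : (n : Int) < N := by push_cast at hn ⊢; omega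
    rw [show ((n + 1 : Nat) : Int) - 1 = (n : Int) by push_cast; ring]
    rw [PySem.List.pyRange_neg_one_cons (by omega)]
    rw [List.foldl_cons]
    have hhead : ((PySem.List.pyRange ((n + 1 : Nat) : Int) (N + 1) 1).map (firstGE peaks)).headI
        = firstGE peaks ((n : Int) + 1) := by
      rw [show ((n + 1 : Nat) : Int) = (n : Int) + 1 by push_cast; ring]
      rw [PySem.List.pyRange_one_cons (by omega)]
      rfl
    have hcons : (if PySem.Set.contains (PySem.Set.ofList peaks) (n : Int) then (n : Int)
          else ((PySem.List.pyRange ((n + 1 : Nat) : Int) (N + 1) 1).map (firstGE peaks)).headI)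
          :: ((PySem.List.pyRange ((n + 1 : Nat) : Int) (N + 1) 1).map (firstGE peaks))
        = (PySem.List.pyRange (n : Int) (N + 1) 1).map (firstGE peaks) := by
      rw [hhead]
      have hrhs : (PySem.List.pyRange (n : Int) (N + 1) 1).map (firstGE peaks)
          = firstGE peaks (n : Int)
            :: (PySem.List.pyRange ((n : Int) + 1) (N + 1) 1).map (firstGE peaks) := by
        rw [PySem.List.pyRange_one_cons (a := (n : Int)) (by omega), List.map_cons]
      rw [hrhs, show ((n + 1 : Nat) : Int) = (n : Int) + 1 by push_cast; ring]
      congr 1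
      rw [firstGE_step peaks (n : Int) hs]
      by_cases hm : (n : Int) ∈ peaks
      · rw [if_pos ((PySem.Set.contains_iff _ _).mpr ((PySem.Set.mem_ofList _ _).mpr hm)),
          if_pos hm]
      · rw [if_neg (fun h => hm ((PySem.Set.mem_ofList _ _).mp
            ((PySem.Set.contains_iff _ _).mp h))), if_neg hm]
    rw [hcons]
    exact ih (by omega)

-- A's scan over the remaining peaks and B's jumps through next_peak plant the same flags
theorem greedy (peaks np : List Int) (N k : Int)
    (hb : ∀ x ∈ peaks, 1 ≤ x ∧ x ≤ N - 2)
    (hnp : np = (PySem.List.pyRange 0 (N + 1) 1).map (firstGE peaks)) (hk : 2 ≤ k) :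
    ∀ (rest pre : List Int) (last cnt : Int) (fuel : Nat),
      peaks = pre ++ rest → (∀ x ∈ pre, x < last + k) → 0 ≤ last →
      fuel = (k - cnt).toNat → cnt < k →
      (innerA k rest last cnt = some k ∧ jumpLoop np N k fuel last cnt = k) ∨
      (innerA k rest last cnt = none ∧ jumpLoop np N k fuel last cnt < k) := by
  have hlook : ∀ j : Int, 0 ≤ j → j < N + 1 → PySem.List.pyGetD np j 0 = firstGE peaks j := by
    intro j h0 h1
    rw [hnp]
    exact PySem.List.pyGetD_map_pyRange_of_nonneg _ _ _ _ h0 h1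
  intro rest
  induction rest with
  | nil =>
    intro pre last cnt fuel hsplit hpre hlast hfuel hcnt
    right
    refine ⟨rfl, ?_⟩
    obtain ⟨fuel', rfl⟩ : ∃ f', fuel = f' + 1 := ⟨fuel - 1, by omega⟩
    have hguard : last + k ≥ N ∨ PySem.List.pyGetD np (last + k) 0 = -1 := by
      by_cases hN' : last + k ≥ N
      · exact Or.inl hN'
      · refine Or.inr ?_
        rw [hlook (last + k) (by omega) (by omega)]
        refine firstGE_top peaks (last + k) ?_
        intro x hx
        exact hpre x (by rw [hsplit, List.append_nil] at hx; exact hx)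
    simp only [jumpLoop, if_pos hguard]
    omega
  | cons p rest' ih =>
    intro pre last cnt fuel hsplit hpre hlast hfuel hcnt
    have hpmem : p ∈ peaks := by rw [hsplit]; simp
    obtain ⟨hp1, hp2⟩ := hb p hpmem
    obtain ⟨fuel', rfl⟩ : ∃ f', fuel = f' + 1 := ⟨fuel - 1, by omega⟩
    by_cases hplant : p - last ≥ k
    · have hfge : firstGE peaks (last + k) = p := by
        unfold firstGE
        rw [hsplit, dropWhile_append_of_forall _ _ _ (fun x hx => hpre x hx)]
        rw [List.dropWhile_cons, if_neg (by simp; omega)]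
        rfl
      have hlookv : PySem.List.pyGetD np (last + k) 0 = p := by
        rw [hlook _ (by omega) (by omega), hfge]
      have hguard : ¬ (last + k ≥ N ∨ PySem.List.pyGetD np (last + k) 0 = -1) := by
        rw [hlookv]; omega
      by_cases hdone : cnt + 1 = k
      · left
        refine ⟨by simp [innerA, hplant, hdone], ?_⟩
        have hf0 : fuel' = 0 := by omega
        subst hf0
        simp only [jumpLoop, if_neg hguard]
        omega
      · have hih := ih (pre ++ [p]) p (cnt + 1) fuel' (by rw [hsplit]; simp)
          (by intro x hx
              rcases List.mem_append.mp hx with h1 | h1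
              · have := hpre x h1; omega
              · simp at h1; omega)
          (by omega) (by omega) (by omega)
        have hstep : jumpLoop np N k (fuel' + 1) last cnt = jumpLoop np N k fuel' p (cnt + 1) := by
          simp only [jumpLoop, hlookv]
          rw [if_neg (by omega : ¬ (last + k ≥ N ∨ p = -1))]
        have hinner : innerA k (p :: rest') last cnt = innerA k rest' p (cnt + 1) := by
          simp only [innerA, if_pos hplant, if_neg hdone]
        rw [hstep, hinner]
        exact hih
    · have hinner : innerA k (p :: rest') last cnt = innerA k rest' last cnt := by
        simp only [innerA, if_neg hplant, if_neg (by omega : ¬ cnt = k)]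
      rw [hinner]
      exact ih (pre ++ [p]) last cnt (fuel' + 1) (by rw [hsplit]; simp)
        (by intro x hx
            rcases List.mem_append.mp hx with h1 | h1
            · exact hpre x h1
            · simp at h1; omega)
        hlast hfuel hcnt

theorem sq_mono (a b : Int) (h1 : 1 ≤ a) (h2 : a ≤ b) : (a - 1) * a ≤ (b - 1) * b := by
  nlinarith

theorem kmax_spec (dist P : Int) :
    ∀ (fuel : Nat) (k : Int), 2 ≤ k → k ≤ P → (k - 1) * k ≤ dist → fuel = (P - k).toNat →
      2 ≤ kmaxLoop dist P fuel k ∧ kmaxLoop dist P fuel k ≤ P ∧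
      (kmaxLoop dist P fuel k - 1) * kmaxLoop dist P fuel k ≤ dist ∧
      (kmaxLoop dist P fuel k = P ∨ dist < (kmaxLoop dist P fuel k + 1) * kmaxLoop dist P fuel k) := by
  intro fuel
  induction fuel with
  | zero =>
    intro k h2 hkP hsq hf
    have : k = P := by omega
    subst this
    exact ⟨h2, le_refl _, hsq, Or.inl rfl⟩
  | succ fuel ih =>
    intro k h2 hkP hsq hf
    by_cases hc : (k + 1) * k ≤ dist ∧ k < P
    · simpa [kmaxLoop, hc] using ih (k + 1) (by omega) (by omega) (by linarith [hc.1]) (by omega)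
    · have : dist < (k + 1) * k ∨ k = P := by
        rcases not_and_or.mp hc with h | h
        · exact Or.inl (by omega)
        · exact Or.inr (by omega)
      simp only [kmaxLoop, if_neg hc]
      exact ⟨h2, hkP, hsq, this.symm.imp id id⟩

theorem outerA_skip (peaks : List Int) (dist : Int) (l1 l2 : List Int)
    (h : ∀ k ∈ l1, dist < (k - 1) * k) :
    outerA peaks dist (l1 ++ l2) = outerA peaks dist l2 := by
  induction l1 with
  | nil => rfl
  | cons x t ih =>
    have hx := h x (by simp)
    simp only [List.cons_append, outerA, if_pos hx]
    exact ih (fun y hy => h y (by simp [hy]))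

theorem outer_eq (peaks np : List Int) (N dist p0 : Int) (ptail : List Int)
    (hpk : peaks = p0 :: ptail)
    (hb : ∀ x ∈ peaks, 1 ≤ x ∧ x ≤ N - 2)
    (hnp : np = (PySem.List.pyRange 0 (N + 1) 1).map (firstGE peaks)) :
    ∀ (l : List Int), (∀ k ∈ l, 2 ≤ k ∧ (k - 1) * k ≤ dist) →
      outerA peaks dist l = outerB np N p0 l := by
  intro l
  induction l with
  | nil => intro _; rfl
  | cons k ks ih =>
    intro h
    obtain ⟨hk2, hksq⟩ := h k (by simp)
    have hrest : ∀ x ∈ ks, 2 ≤ x ∧ (x - 1) * x ≤ dist := fun x hx => h x (by simp [hx])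
    have hin : PySem.List.slice peaks (some 1) none = ptail := by
      rw [PySem.List.slice_from_one, hpk]; rfl
    have hp0 : PySem.List.pyGetD peaks 0 0 = p0 := by rw [hpk, PySem.List.pyGetD_zero_cons]
    have hg := greedy peaks np N k hb hnp hk2 ptail [p0] p0 1 (k - 1).toNat
      (by rw [hpk]; rfl)
      (by intro x hx; simp at hx; omega)
      (by have := hb p0 (by rw [hpk]; simp); omega)
      (by omega) (by omega)
    rcases hg with ⟨ha, hb'⟩ | ⟨ha, hb'⟩
    · have hb2 : jumpLoop np N k (k.toNat - 1) p0 1 = k := by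
        rwa [(by omega : (k - 1).toNat = k.toNat - 1)] at hb'
      simp [outerA, if_neg (by omega : ¬ dist < (k - 1) * k), hin, hp0, ha, outerB, hb2]
    · simp only [outerA, if_neg (by omega : ¬ dist < (k - 1) * k), hin, hp0, ha,
        outerB]
      rw [if_neg (by omega : ¬ jumpLoop np N k (k - 1).toNat p0 1 = k)]
      exact ih hrest

theorem core (N dist kmax p0 : Int) (peaks np t1 : List Int)
    (hpk : peaks = p0 :: t1)
    (hsort : peaks.Pairwise (· < ·))
    (hbnd : ∀ x ∈ peaks, 1 ≤ x ∧ x ≤ N - 2)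
    (hlen : 3 ≤ peaks.length)
    (hdist : dist = PySem.List.pyGetD peaks (-1) 0 - PySem.List.pyGetD peaks 0 0)
    (hnp : np = (PySem.List.pyRange 0 (N + 1) 1).map (firstGE peaks))
    (hkm : kmax = kmaxLoop dist ((peaks.length : Int)) (((peaks.length : Int)) - 2).toNat 2) :
    outerA peaks dist (PySem.List.pyRange ((peaks.length : Int)) 1 (-1)) =
      outerB np N p0 (PySem.List.pyRange kmax 1 (-1)) := by
  subst hpk
  rcases t1 with _ | ⟨p1, t2⟩
  · simp at hlen
  rcases t2 with _ | ⟨p2, t3⟩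
  · simp at hlen
  -- dist is at least 2: the list is strictly increasing with at least three entries
  have hd2 : 2 ≤ dist := by
    have hgl : (p0 :: p1 :: p2 :: t3).getLast (by simp) = (p2 :: t3).getLast (by simp) := by
      rw [List.getLast_cons (by simp), List.getLast_cons (by simp)]
    have hmem := List.getLast_mem (l := p2 :: t3) (by simp)
    rcases List.pairwise_cons.mp hsort with ⟨h0, hs1⟩
    rcases List.pairwise_cons.mp hs1 with ⟨h1, _⟩
    have hp01 : p0 < p1 := h0 p1 (by simp)
    have hp1l : p1 < (p2 :: t3).getLast (by simp) := h1 _ hmem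
    rw [hdist, PySem.List.pyGetD_neg_one _ 0 (by simp), PySem.List.pyGetD_zero_cons, hgl]
    omega
  have hP3 : (3 : Int) ≤ ((p0 :: p1 :: p2 :: t3).length : Int) := by
    simp; omega
  obtain ⟨hk2, hkP, hksq, hklast⟩ :
      2 ≤ kmax ∧ kmax ≤ ((p0 :: p1 :: p2 :: t3).length : Int) ∧
      (kmax - 1) * kmax ≤ dist ∧
      (kmax = ((p0 :: p1 :: p2 :: t3).length : Int) ∨ dist < (kmax + 1) * kmax) := by
    rw [hkm]
    exact kmax_spec dist _ _ 2 (by omega) (by omega) (by omega) rfl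
  have hsplit : PySem.List.pyRange ((p0 :: p1 :: p2 :: t3).length : Int) 1 (-1) =
      PySem.List.pyRange ((p0 :: p1 :: p2 :: t3).length : Int) kmax (-1) ++
        PySem.List.pyRange kmax 1 (-1) := by
    rw [PySem.List.pyRange_neg_one_eq_reverse _ 1, PySem.List.pyRange_neg_one_eq_reverse _ kmax,
      PySem.List.pyRange_neg_one_eq_reverse kmax 1, ← List.reverse_append,
      ← PySem.List.pyRange_one_append (1 + 1) (kmax + 1) _ (by omega) (by omega)]
  rw [hsplit]
  rw [outerA_skip _ _ _ _ ?hskip]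
  case hskip =>
    intro k hkmem
    rcases PySem.List.mem_pyRange_neg_one.mp hkmem with ⟨hlo, hhi⟩
    rcases hklast with h | h
    · omega
    · calc dist < (kmax + 1) * kmax := h
        _ = (kmax + 1 - 1) * (kmax + 1) := by ring
        _ ≤ (k - 1) * k := sq_mono _ _ (by omega) (by omega)
  refine outer_eq _ _ N dist p0 (p1 :: p2 :: t3) rfl hbnd hnp _ ?_
  intro k hkmem
  rcases PySem.List.mem_pyRange_neg_one.mp hkmem with ⟨hlo, hhi⟩
  refine ⟨by omega, ?_⟩
  calc (k - 1) * k ≤ (kmax - 1) * kmax := sq_mono _ _ (by omega) (by omega)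
    _ ≤ dist := hksq

theorem solution_spec : Claim_equal_solution := by
  intro A _
  show solution A = solution_alt A
  unfold solution solution_alt
  by_cases hN : ((A.length : Int)) < 3
  · simp only [if_pos hN]
  · simp only [if_neg hN]
    set peaks := (PySem.List.pyRange 1 ((A.length : Int) - 1) 1).filter
      (fun i => decide (PySem.List.pyGetD A i 0 > PySem.List.pyGetD A (i - 1) 0) &&
                decide (PySem.List.pyGetD A i 0 > PySem.List.pyGetD A (i + 1) 0)) with hpeaks
    by_cases hP : ((peaks.length : Int)) ≤ 2
    · simp only [if_pos hP]
    · simp only [if_neg hP]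
      have hsort : peaks.Pairwise (· < ·) := by
        rw [hpeaks]
        exact (PySem.List.pairwise_lt_pyRange_one 1 ((A.length : Int) - 1)).filter _
      have hbnd : ∀ x ∈ peaks, 1 ≤ x ∧ x ≤ (A.length : Int) - 2 := by
        intro x hx
        rw [hpeaks] at hx
        have := PySem.List.mem_pyRange_one.mp (List.mem_of_mem_filter hx)
        omega
      have hlen : 3 ≤ peaks.length := by omega
      obtain ⟨p0, t1, hpk⟩ : ∃ p0 t1, peaks = p0 :: t1 := by
        rcases peaks with _ | ⟨p0, t1⟩
        · simp at hlen
        · exact ⟨p0, t1, rfl⟩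
      have hnp : (PySem.List.pyRange ((A.length : Int) - 1) (-1) (-1)).foldl
          (fun acc j => (if PySem.Set.contains (PySem.Set.ofList peaks) j then j else acc.headI)
            :: acc) [-1]
          = (PySem.List.pyRange 0 ((A.length : Int) + 1) 1).map (firstGE peaks) := by
        have hstart : ([(-1 : Int)]) =
            (PySem.List.pyRange ((A.length : Nat) : Int) ((A.length : Int) + 1) 1).map
              (firstGE peaks) := by
          rw [PySem.List.pyRange_one_singleton, List.map_singleton,
            firstGE_top peaks _ (fun x hx => by have := hbnd x hx; omega)]
        rw [show ((A.length : Int) - 1) = (((A.length : Nat) : Int)) - 1 by rfl,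
          hstart]
        exact build_np peaks ((A.length : Int)) hsort (A.length) (by omega)
      have hco := core ((A.length : Int))
        (PySem.List.pyGetD peaks (-1) 0 - PySem.List.pyGetD peaks 0 0)
        (kmaxLoop (PySem.List.pyGetD peaks (-1) 0 - PySem.List.pyGetD peaks 0 0)
          ((peaks.length : Int)) (((peaks.length : Int)) - 2).toNat 2)
        p0 peaks _ t1 hpk hsort hbnd hlen rfl hnp rfl
      rw [hpk, PySem.List.pyGetD_zero_cons] at hco ⊢
      rw [hco]
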